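-- pv_equiv track=rewrite | github.com/GuilongMa/python- | 二分查找/erfen_check.py | get_last_equal_value
-- ===== SOURCE A (Python) =====
-- def get_last_equal_value(L, n, value):
--     left = 0
--     right = n - 1
--     while left <= right:
--         mid = left + ((right - left) >> 1)
--         if value < L[mid]:
--             right = mid - 1
--         elif value > L[mid]:
--             left = mid + 1
--         else:
--             if mid == n - 1 or L[mid + 1] > value:
--                 return mid
--             left = mid + 1
--     return None
-- ===== SOURCE B (Python) =====
-- def get_last_equal_value(L, n, value):
--     # Backward linear scan over L[0:n]: the last occurrence of value is the
--     # first match seen from the right; since the prefix is sorted, as soon as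
--     # an element drops below value no match can exist further left.
--     i = n - 1
--     while i >= 0:
--         x = L[i]
--         if x == value:
--             return i
--         if x < value:
--             return None
--         i -= 1
--     return None
-- ===== Notes on version B (the rewrite author's own statement) =====
-- stated objective: simpler
-- what changed: Replaces the three-way binary search with a plain backward linear scan of the sorted prefix that returns the first match seen from the right and stops early once elements drop below the target.
-- outside the precondition, e.g. on get_last_equal_value([1, 0, 1, 3, 2], 5, 2): A returns None, B returns 4; on get_last_equal_value([5], 2, 0): A returns None, B raises IndexError
import Mathlib
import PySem

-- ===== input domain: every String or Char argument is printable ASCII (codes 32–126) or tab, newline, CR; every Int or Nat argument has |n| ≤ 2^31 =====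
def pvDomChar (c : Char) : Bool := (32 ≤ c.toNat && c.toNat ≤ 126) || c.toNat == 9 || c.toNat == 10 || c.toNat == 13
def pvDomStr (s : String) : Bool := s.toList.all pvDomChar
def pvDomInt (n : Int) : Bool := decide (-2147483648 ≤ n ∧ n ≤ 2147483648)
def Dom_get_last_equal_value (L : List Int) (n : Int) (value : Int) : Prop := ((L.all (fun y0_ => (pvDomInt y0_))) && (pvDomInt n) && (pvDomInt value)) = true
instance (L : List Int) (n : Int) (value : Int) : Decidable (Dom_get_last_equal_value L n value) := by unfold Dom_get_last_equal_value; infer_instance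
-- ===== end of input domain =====

-- B replaces A's three-way binary search by a backward linear scan of the sorted prefix
-- with an early cutoff (objective: simpler code, not faster).

-- ===== PORT A =====
-- while left <= right: three-way compare at mid, early return at the right boundary.
-- The Nat fuel only makes the while-loop total; it starts above the loop's measure
-- (right + 1 - left).toNat, so the 0-fuel branch is never reached from the entry point.
def pvLoopA (L : List Int) (n : Int) (value : Int) (fuel : Nat) (left right : Int) : Option Int :=
  match fuel with
  | 0 => none
  | fuel + 1 =>
    if left ≤ right then
      let mid := left + ((right - left) >>> (1 : Nat))
      let x := PySem.List.pyGetD L mid 0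
      if value < x then pvLoopA L n value fuel left (mid - 1)
      else if value > x then pvLoopA L n value fuel (mid + 1) right
      else if mid = n - 1 ∨ value < PySem.List.pyGetD L (mid + 1) 0 then some mid
      else pvLoopA L n value fuel (mid + 1) right
    else none

def get_last_equal_value (L : List Int) (n : Int) (value : Int) : Option Int :=
  pvLoopA L n value (n.toNat + 1) 0 (n - 1)

-- ===== PORT B =====
-- while i >= 0: inspect L[i] from the right; return at the first match, stop early
-- when the element drops below value. Fuel starts above the measure (i + 1).toNat.
def pvScanB (L : List Int) (value : Int) (fuel : Nat) (i : Int) : Option Int :=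
  match fuel with
  | 0 => none
  | fuel + 1 =>
    if 0 ≤ i then
      let x := PySem.List.pyGetD L i 0
      if x = value then some i
      else if x < value then none
      else pvScanB L value fuel (i - 1)
    else none

def get_last_equal_value_alt (L : List Int) (n : Int) (value : Int) : Option Int :=
  pvScanB L value (n.toNat + 1) (n - 1)

-- ===== PRECONDITION & SPEC =====
-- Pre_ excludes (a) n exceeding the list length, where Python's L[i] raises IndexError,
-- and (b) an unsorted first-n prefix, on which the value of any search is an artefact
-- of its probe order and neither A's nor B's answer is specified.
def Pre_get_last_equal_value (L : List Int) (n : Int) (value : Int) : Prop :=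
  n ≤ (L.length : Int) ∧ List.Pairwise (· ≤ ·) (L.take n.toNat)
instance (L : List Int) (n : Int) (value : Int) : Decidable (Pre_get_last_equal_value L n value) := by unfold Pre_get_last_equal_value; infer_instance

def pvWitness_get_last_equal_value : List Int × Int × Int := ([1, 2, 2, 3], 4, 2)

def Spec_get_last_equal_value (L : List Int) (n : Int) (value : Int) (out : Option Int) : Prop := out = get_last_equal_value_alt L n value
instance (L : List Int) (n : Int) (value : Int) (out : Option Int) : Decidable (Spec_get_last_equal_value L n value out) := by unfold Spec_get_last_equal_value; infer_instance

-- ===== CLAIM (what is proved, stated in full; the proofs are below) =====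
def Claim_equal_get_last_equal_value : Prop := ∀ (L : List Int) (n : Int) (value : Int), Dom_get_last_equal_value L n value → Pre_get_last_equal_value L n value → Spec_get_last_equal_value L n value (get_last_equal_value L n value)

-- ===== LEMMAS AND PROOFS =====

-- the correct answer: either no index of [0,n) holds value, or j is the last one that does
def GoodOut (L : List Int) (n : Int) (value : Int) (o : Option Int) : Prop :=
  match o with
  | none => ∀ i : Int, 0 ≤ i → i < n → PySem.List.pyGetD L i 0 ≠ value
  | some j => 0 ≤ j ∧ j < n ∧ PySem.List.pyGetD L j 0 = value ∧
      ∀ i : Int, j < i → i < n → PySem.List.pyGetD L i 0 ≠ value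

theorem goodOut_unique (L : List Int) (n value : Int) (o1 o2 : Option Int)
    (h1 : GoodOut L n value o1) (h2 : GoodOut L n value o2) : o1 = o2 := by
  match o1, o2 with
  | none, none => rfl
  | none, some j => exact absurd h2.2.2.1 (h1 j h2.1 h2.2.1)
  | some j, none => exact absurd h1.2.2.1 (h2 j h1.1 h1.2.1)
  | some j, some k =>
    obtain ⟨hj0, hjn, hjv, hjmax⟩ := h1
    obtain ⟨hk0, hkn, hkv, hkmax⟩ := h2
    rcases lt_trichotomy j k with h | h | h
    · exact absurd hkv (hjmax k h hkn)
    · exact congrArg some h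
    · exact absurd hjv (hkmax j h hjn)

theorem mono_of_sorted (L : List Int) (n : Int)
    (hn : n ≤ (L.length : Int)) (hs : List.Pairwise (· ≤ ·) (L.take n.toNat))
    (i j : Int) (hi : 0 ≤ i) (hij : i ≤ j) (hj : j < n) :
    PySem.List.pyGetD L i 0 ≤ PySem.List.pyGetD L j 0 := by
  have hiL : i < (L.length : Int) := by omega
  have hjL : j < (L.length : Int) := by omega
  rw [PySem.List.pyGetD_eq_getElem L 0 hi hiL,
      PySem.List.pyGetD_eq_getElem L 0 (by omega) hjL]
  rcases eq_or_lt_of_le hij with h | h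
  · simp [h]
  · have hgl := List.pairwise_iff_getElem.mp hs i.toNat j.toNat
      (by simp; omega) (by simp; omega) (by omega)
    simpa using hgl

theorem loopA_good (L : List Int) (n value : Int)
    (hn : n ≤ (L.length : Int)) (hs : List.Pairwise (· ≤ ·) (L.take n.toNat)) :
    ∀ (fuel : Nat) (left right : Int), (right + 1 - left).toNat < fuel → 0 ≤ left → right ≤ n - 1 →
    ((∃ j : Int, 0 ≤ j ∧ j < n ∧ PySem.List.pyGetD L j 0 = value) →
      ∃ j : Int, left ≤ j ∧ j ≤ right ∧ PySem.List.pyGetD L j 0 = value) →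
    (∀ i : Int, right < i → i < n → value < PySem.List.pyGetD L i 0) →
    GoodOut L n value (pvLoopA L n value fuel left right) := by
  intro fuel
  induction fuel with
  | zero => intro left right hf; omega
  | succ f ih =>
    intro left right hf hl hr hex hhi
    rw [pvLoopA]
    by_cases hlr : left ≤ right
    · rw [if_pos hlr]
      show GoodOut L n value
        (if value < PySem.List.pyGetD L (left + ((right - left) >>> (1 : Nat))) 0 then _
         else _)
      have hmid : left + ((right - left) >>> (1 : Nat)) = left + (right - left) / 2 := by
        simp [Int.shiftRight_eq_div_pow]
      set mid := left + ((right - left) >>> (1 : Nat)) with hmds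
      by_cases hc1 : value < PySem.List.pyGetD L mid 0
      · rw [if_pos hc1]
        refine ih left (mid - 1) (by omega) hl (by omega) ?_ ?_
        · intro hgl
          obtain ⟨j, hj1, hj2, hj3⟩ := hex hgl
          refine ⟨j, hj1, ?_, hj3⟩
          by_contra hc
          have := mono_of_sorted L n hn hs mid j (by omega) (by omega) (by omega)
          omega
        · intro i hmi hin
          have := mono_of_sorted L n hn hs mid i (by omega) (by omega) hin
          omega
      · rw [if_neg hc1]
        by_cases hc2 : value > PySem.List.pyGetD L mid 0
        · rw [if_pos hc2]
          refine ih (mid + 1) right (by omega) (by omega) hr ?_ hhi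
          intro hgl
          obtain ⟨j, hj1, hj2, hj3⟩ := hex hgl
          refine ⟨j, ?_, hj2, hj3⟩
          by_contra hc
          have := mono_of_sorted L n hn hs j mid (by omega) (by omega) (by omega)
          omega
        · rw [if_neg hc2]
          by_cases hc3 : mid = n - 1 ∨ value < PySem.List.pyGetD L (mid + 1) 0
          · rw [if_pos hc3]
            refine ⟨by omega, by omega, by omega, ?_⟩
            intro i hmi hin
            rcases hc3 with hc | hc
            · omega
            · have := mono_of_sorted L n hn hs (mid + 1) i (by omega) (by omega) hin
              omega
          · rw [if_neg hc3]
            rw [not_or] at hc3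
            obtain ⟨hne, hle1⟩ := hc3
            rw [Int.not_lt] at hle1
            have hg1 : PySem.List.pyGetD L (mid + 1) 0 = value := by
              have := mono_of_sorted L n hn hs mid (mid + 1) (by omega) (by omega) (by omega)
              omega
            have hmr1 : mid + 1 ≤ right := by
              by_contra hc
              have := hhi (mid + 1) (by omega) (by omega)
              omega
            exact ih (mid + 1) right (by omega) (by omega) hr
              (fun _ => ⟨mid + 1, by omega, hmr1, hg1⟩) hhi
    · rw [if_neg hlr]
      intro i hi0 hin hvi
      obtain ⟨j, hj1, hj2, _⟩ := hex ⟨i, hi0, hin, hvi⟩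
      omega

theorem scanB_good (L : List Int) (n value : Int)
    (hn : n ≤ (L.length : Int)) (hs : List.Pairwise (· ≤ ·) (L.take n.toNat)) :
    ∀ (fuel : Nat) (i : Int), i < (fuel : Int) → i ≤ n - 1 →
    (∀ j : Int, i < j → j < n → value < PySem.List.pyGetD L j 0) →
    GoodOut L n value (pvScanB L value fuel i) := by
  intro fuel
  induction fuel with
  | zero =>
    intro i hf hin hinv
    intro k hk0 hkn hkv
    have := hinv k (by omega) hkn
    omega
  | succ f ih =>
    intro i hf hin hinv
    rw [pvScanB]
    by_cases hi0 : 0 ≤ i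
    · rw [if_pos hi0]
      show GoodOut L n value
        (if PySem.List.pyGetD L i 0 = value then some i
         else if PySem.List.pyGetD L i 0 < value then none
         else pvScanB L value f (i - 1))
      by_cases hc1 : PySem.List.pyGetD L i 0 = value
      · rw [if_pos hc1]
        refine ⟨hi0, by omega, hc1, ?_⟩
        intro k hik hkn hkv
        have := hinv k hik hkn
        omega
      · rw [if_neg hc1]
        by_cases hc2 : PySem.List.pyGetD L i 0 < value
        · rw [if_pos hc2]
          intro k hk0 hkn hkv
          by_cases h : k ≤ i
          · have := mono_of_sorted L n hn hs k i hk0 h (by omega)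
            omega
          · have := hinv k (by omega) hkn
            omega
        · rw [if_neg hc2]
          refine ih (i - 1) (by omega) (by omega) ?_
          intro j hij hjn
          rcases eq_or_lt_of_le (show i ≤ j by omega) with h | h
          · rw [← h]; omega
          · exact hinv j h hjn
    · rw [if_neg hi0]
      intro k hk0 hkn hkv
      have := hinv k (by omega) hkn
      omega

-- ===== VERDICT (by name: the statement is the Claim_ definition above) =====
theorem get_last_equal_value_spec : Claim_equal_get_last_equal_value := by
  intro L n value _hDom hPre
  obtain ⟨hn, hs⟩ := hPre
  unfold Spec_get_last_equal_value
  apply goodOut_unique L n value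
  · unfold get_last_equal_value
    apply loopA_good L n value hn hs (n.toNat + 1) 0 (n - 1) (by omega) le_rfl le_rfl
    · intro ⟨j, h0, h1, h2⟩
      exact ⟨j, h0, by omega, h2⟩
    · intro i h1 h2
      omega
  · unfold get_last_equal_value_alt
    apply scanB_good L n value hn hs (n.toNat + 1) (n - 1) (by omega) le_rfl
    intro j h1 h2
    omega
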